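-- pv_equiv track=rewrite | github.com/thewrz/WrzDJ | kiosk/wifi-portal/portal.py | _parse_nmcli_fields
-- ===== SOURCE A (Python) =====
-- def _parse_nmcli_fields(line):
--     """Parse nmcli -t output, handling \\: escapes for literal colons in values."""
--     fields = []
--     current = []
--     i = 0
--     while i < len(line):
--         if line[i] == "\\" and i + 1 < len(line) and line[i + 1] == ":":
--             current.append(":")
--             i += 2
--         elif line[i] == ":":
--             fields.append("".join(current))
--             current = []
--             i += 1
--         else:
--             current.append(line[i])
--             i += 1
--     fields.append("".join(current))
--     return fields
-- ===== SOURCE B (Python) =====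
-- def _parse_nmcli_fields(line):
--     """Parse nmcli -t output, handling \\: escapes for literal colons in values."""
--     parts = line.split(":")
--     fields = []
--     buf = parts[0]
--     for part in parts[1:]:
--         if buf.endswith("\\"):
--             buf = buf[:-1] + ":" + part
--         else:
--             fields.append(buf)
--             buf = part
--     fields.append(buf)
--     return fields
-- ===== Notes on version B (the rewrite author's own statement) =====
-- stated objective: faster
-- what changed: Replaces the index-based char-by-char scan (with two-char lookahead) by a single str.split on the colon separator followed by one merge pass that re-joins adjacent parts whenever the running buffer ends in a backslash.
import Mathlib
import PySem

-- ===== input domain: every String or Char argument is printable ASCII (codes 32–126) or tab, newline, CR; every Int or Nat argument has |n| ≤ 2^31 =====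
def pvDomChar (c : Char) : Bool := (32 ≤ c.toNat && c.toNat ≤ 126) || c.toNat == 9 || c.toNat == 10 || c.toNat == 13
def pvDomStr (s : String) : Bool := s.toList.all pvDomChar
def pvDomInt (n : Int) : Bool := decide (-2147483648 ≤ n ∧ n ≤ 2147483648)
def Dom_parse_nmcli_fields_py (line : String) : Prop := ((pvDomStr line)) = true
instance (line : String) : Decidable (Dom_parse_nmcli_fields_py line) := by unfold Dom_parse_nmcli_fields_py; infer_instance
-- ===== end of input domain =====

-- B replaces A's index-based char scan by a split-on-':' pass followed by a merge pass
-- that re-joins parts whose running buffer ends in a backslash (objective: alternative).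


-- ===== PORT A =====
-- A's while loop over indices, transcribed as recursion over the character list with the
-- same if/elif/else order: escape branch consumes two chars (i += 2), ':' flushes
-- `current`, otherwise the char is appended to `current`.
def goA : List Char → List Char → List String → List String
  | [], cur, fields => fields ++ [String.ofList cur]
  | c :: rest, cur, fields =>
    if c = '\\' ∧ rest.head? = some ':' then goA rest.tail (cur ++ [':']) fields
    else if c = ':' then goA rest [] (fields ++ [String.ofList cur])
    else goA rest (cur ++ [c]) fields
termination_by cs _ _ => cs.length
decreasing_by
  · simp only [List.length_cons]; cases rest <;> simp
  · simp
  · simp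

def parse_nmcli_fields_py (line : String) : List String :=
  goA line.toList [] []

-- ===== PORT B =====
-- line.split(":") ported step for step as a recursive single-character split (exact:
-- Python's str.split with a one-char separator; "".split(":") == [""]).
def splitCh : List Char → List (List Char)
  | [] => [[]]
  | c :: rest =>
    if c = ':' then [] :: splitCh rest
    else
      match splitCh rest with
      | p :: ps => (c :: p) :: ps
      | [] => [[c]]

-- B's for-loop over parts[1:] with the (fields, buf) state; buf.endswith("\\") merges
-- (drop the trailing backslash, reattach ':' + part), otherwise flush buf.
def parse_nmcli_fields_py_alt (line : String) : List String :=
  let parts := splitCh line.toList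
  let st := (parts.tail).foldl
    (fun (acc : List String × List Char) part =>
      if acc.2.getLast? = some '\\' then (acc.1, acc.2.dropLast ++ ':' :: part)
      else (acc.1 ++ [String.ofList acc.2], part))
    (([] : List String), parts.headD [])
  st.1 ++ [String.ofList st.2]

-- ===== PRECONDITION & SPEC =====
def Spec_parse_nmcli_fields_py (line : String) (out : List String) : Prop := out = parse_nmcli_fields_py_alt line
instance (line : String) (out : List String) : Decidable (Spec_parse_nmcli_fields_py line out) := by unfold Spec_parse_nmcli_fields_py; infer_instance

-- ===== CLAIM (what is proved, stated in full; the proofs are below) =====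
def Claim_equal_parse_nmcli_fields_py : Prop := ∀ (line : String), Dom_parse_nmcli_fields_py line → Spec_parse_nmcli_fields_py line (parse_nmcli_fields_py line)

-- ===== LEMMAS AND PROOFS =====

-- splitCh never returns the empty list.
theorem splitCh_ne_nil (cs : List Char) : splitCh cs ≠ [] := by
  induction cs with
  | nil => simp [splitCh]
  | cons c rest ih =>
    simp only [splitCh]
    split
    · simp
    · cases h : splitCh rest with
      | nil => simp
      | cons p ps => simp

-- Recursive presentation of B's merge loop (used only in the proofs).
def mergeGo (buf : List Char) : List (List Char) → List (List Char)
  | [] => [buf]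
  | p :: ps =>
    if buf.getLast? = some '\\' then mergeGo (buf.dropLast ++ ':' :: p) ps
    else buf :: mergeGo p ps

-- B's foldl equals the recursive merge, fields prepended.
theorem foldl_merge (parts : List (List Char)) :
    ∀ (fields : List String) (buf : List Char),
    (parts.foldl
        (fun (acc : List String × List Char) part =>
          if acc.2.getLast? = some '\\' then (acc.1, acc.2.dropLast ++ ':' :: part)
          else (acc.1 ++ [String.ofList acc.2], part))
        (fields, buf)).1
      ++ [String.ofList (parts.foldl
        (fun (acc : List String × List Char) part =>
          if acc.2.getLast? = some '\\' then (acc.1, acc.2.dropLast ++ ':' :: part)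
          else (acc.1 ++ [String.ofList acc.2], part))
        (fields, buf)).2]
      = fields ++ (mergeGo buf parts).map String.ofList := by
  induction parts with
  | nil => intro fields buf; simp [mergeGo]
  | cons p ps ih =>
    intro fields buf
    simp only [List.foldl_cons, mergeGo]
    by_cases h : buf.getLast? = some '\\'
    · simp only [h]
      exact ih fields (buf.dropLast ++ ':' :: p)
    · simp only [if_neg h]
      rw [ih (fields ++ [String.ofList buf]) p]
      simp

-- A's fields accumulator is a plain prefix of the result.
theorem goA_acc : ∀ (n : ℕ) (cs : List Char), cs.length ≤ n →
    ∀ (cur : List Char) (fields : List String),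
    goA cs cur fields = fields ++ goA cs cur [] := by
  intro n
  induction n with
  | zero =>
    intro cs h cur fields
    have : cs = [] := by cases cs <;> simp_all
    subst this; simp [goA]
  | succ n ih =>
    intro cs h cur fields
    cases cs with
    | nil => simp [goA]
    | cons c rest =>
      simp only [goA]
      split
      · next hesc =>
        have ht : rest.tail.length ≤ n := by
          cases rest <;> simp_all <;> omega
        rw [ih rest.tail ht, ih rest.tail ht (cur ++ [':']) []]
      · split
        · next hc =>
          have hr : rest.length ≤ n := by simp at h; omega
          simp only [List.nil_append]
          rw [ih rest hr, ih rest hr [] [String.ofList cur]]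
          simp
        · next hc =>
          have hr : rest.length ≤ n := by simp at h; omega
          rw [ih rest hr, ih rest hr (cur ++ [c]) []]

-- Core correspondence: A's scan equals B's merge of the split, for any prefix buffer
-- not ending in an active escape.
theorem goA_merge : ∀ (n : ℕ) (cs : List Char), cs.length ≤ n →
    ∀ (cur : List Char), (cur.getLast? = some '\\' → cs.head? ≠ some ':') →
    goA cs cur [] =
      ((mergeGo (cur ++ (splitCh cs).headD []) (splitCh cs).tail).map String.ofList) := by
  intro n
  induction n with
  | zero =>
    intro cs h cur _
    have : cs = [] := by cases cs <;> simp_all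
    subst this; simp [goA, splitCh, mergeGo]
  | succ n ih =>
    intro cs h cur hcur
    cases cs with
    | nil => simp [goA, splitCh, mergeGo]
    | cons c rest =>
      simp only [goA]
      split
      · next hesc =>
        -- escape: c = '\' and rest = ':' :: rest'
        obtain ⟨hc, hhead⟩ := hesc
        subst hc
        cases rest with
        | nil => simp at hhead
        | cons c2 rest' =>
          simp only [List.head?_cons, Option.some.injEq] at hhead
          subst hhead
          have ht : rest'.length ≤ n := by simp at h; omega
          have hne : splitCh rest' ≠ [] := splitCh_ne_nil rest'
          obtain ⟨p', ps', hsp⟩ : ∃ p' ps', splitCh rest' = p' :: ps' := by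
            cases hh : splitCh rest' with
            | nil => exact absurd hh hne
            | cons a b => exact ⟨a, b, rfl⟩
          have hstep := ih rest' ht (cur ++ [':'])
            (by simp)
          rw [List.tail_cons, hstep, hsp]
          have hsplit : splitCh ('\\' :: ':' :: rest') = ['\\'] :: p' :: ps' := by
            simp [splitCh, hsp]
          rw [hsplit]
          simp only [List.headD_cons, List.tail_cons, mergeGo]
          rw [if_pos (by simp)]
          have : (cur ++ ['\\']).dropLast ++ ':' :: p' = (cur ++ [':']) ++ p' := by
            simp
          rw [this]
      · split
        · next hesc hc =>
          -- flush: c = ':'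
          subst hc
          have hr : rest.length ≤ n := by simp at h; omega
          have hcur' : cur.getLast? ≠ some '\\' := by
            intro hl
            exact hcur hl (by simp)
          obtain ⟨p', ps', hsp⟩ : ∃ p' ps', splitCh rest = p' :: ps' := by
            cases hh : splitCh rest with
            | nil => exact absurd hh (splitCh_ne_nil rest)
            | cons a b => exact ⟨a, b, rfl⟩
          rw [goA_acc n rest hr, ih rest hr [] (by simp), hsp]
          have hsplit : splitCh (':' :: rest) = [] :: p' :: ps' := by
            simp [splitCh, hsp]
          rw [hsplit]
          simp only [List.headD_cons, List.tail_cons, mergeGo, List.nil_append,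
            List.append_nil]
          rw [if_neg hcur']
          simp
        · next hesc hc =>
          -- plain char
          have hr : rest.length ≤ n := by simp at h; omega
          obtain ⟨p', ps', hsp⟩ : ∃ p' ps', splitCh rest = p' :: ps' := by
            cases hh : splitCh rest with
            | nil => exact absurd hh (splitCh_ne_nil rest)
            | cons a b => exact ⟨a, b, rfl⟩
          have hcur' : (cur ++ [c]).getLast? = some '\\' → rest.head? ≠ some ':' := by
            intro hl hh
            simp at hl
            exact hesc ⟨hl, hh⟩
          rw [ih rest hr (cur ++ [c]) hcur', hsp]
          have hsplit : splitCh (c :: rest) = (c :: p') :: ps' := by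
            simp [splitCh, hc, hsp]
          rw [hsplit]
          simp

-- ===== VERDICT (by name: the statement is the Claim_ definition above) =====
theorem parse_nmcli_fields_py_spec : Claim_equal_parse_nmcli_fields_py := by
  intro line _
  unfold Spec_parse_nmcli_fields_py parse_nmcli_fields_py parse_nmcli_fields_py_alt
  simp only []
  rw [foldl_merge, goA_merge line.toList.length line.toList le_rfl [] (by simp)]
  simp
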